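-- pv_equiv track=rewrite | github.com/rysweet/MicrosoftHackathon2025-AgenticCoding | fix_conflict.py | fix_conflict_content
-- ===== SOURCE A (Python) =====
-- def fix_conflict_content(content: str) -> tuple[str, bool]:
--     """Fix merge conflict by keeping the version with pragma comment.
--
--     Strategy:
--     1. Find conflict markers (<<<<<<, =======, >>>>>>>)
--     2. Extract both versions (HEAD and theirs)
--     3. Keep the version with pragma comment
--     4. Fallback: keep longer line if neither has pragma
--     5. Remove all conflict markers
--
--     Args:
--         content: File content with potential conflict markers
--
--     Returns:
--         Tuple of (fixed_content, was_conflict_found)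
--     """
--     if "<<<<<<< HEAD" not in content:
--         return content, False
--
--     lines = content.splitlines(keepends=True)
--     result = []
--     i = 0
--     conflict_found = False
--
--     while i < len(lines):
--         line = lines[i]
--
--         # Found conflict start
--         if line.strip().startswith("<<<<<<<"):
--             conflict_found = True
--
--             # Find the line between HEAD and =======
--             i += 1
--             head_line = lines[i]
--
--             # Skip to =======
--             while i < len(lines) and not lines[i].strip().startswith("======="):
--                 i += 1
--
--             # Skip to >>>>>>> and grab their line
--             i += 1
--             their_line = lines[i]
--
--             # Skip to end marker
--             while i < len(lines) and not lines[i].strip().startswith(">>>>>>>"):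
--                 i += 1
--
--             # Robust selection: explicitly check for pragma comment
--             if "pragma: allowlist secret" in head_line:
--                 result.append(head_line)
--             elif "pragma: allowlist secret" in their_line:
--                 result.append(their_line)
--             else:
--                 # Fallback: keep longer line (likely has more content)
--                 result.append(head_line if len(head_line) > len(their_line) else their_line)
--
--             i += 1
--         else:
--             result.append(line)
--             i += 1
--
--     return "".join(result), conflict_found
-- ===== SOURCE B (Python) =====
-- def _find(lines, marker, start):
--     """Index of the first line at or after `start` whose stripped text starts
--     with `marker`, or None."""
--     for k in range(start, len(lines)):
--         if lines[k].strip().startswith(marker):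
--             return k
--     return None
--
--
-- def fix_conflict_content(content: str) -> tuple[str, bool]:
--     """Resolve git merge conflicts, keeping the pragma/longer line.
--
--     Slice-based rewrite: repeatedly locate the next conflict block with
--     _find, copy the clean prefix over unchanged, and replace the block by
--     the chosen line; the conflict flag is computed independently with any().
--     """
--     if "<<<<<<< HEAD" not in content:
--         return content, False
--
--     lines = content.splitlines(keepends=True)
--     out = []
--     rest = lines
--     while True:
--         s = _find(rest, "<<<<<<<", 0)
--         if s is None:
--             out += rest
--             break
--         head = rest[s + 1]
--         j = _find(rest, "=======", s + 1)
--         if j is None: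
--             raise IndexError("malformed conflict: missing ======= marker")
--         their = rest[j + 1]
--         k = _find(rest, ">>>>>>>", j + 1)
--         if k is None:
--             k = len(rest)
--         if "pragma: allowlist secret" in head:
--             chosen = head
--         elif "pragma: allowlist secret" in their:
--             chosen = their
--         else:
--             chosen = head if len(head) > len(their) else their
--         out += rest[:s]
--         out.append(chosen)
--         rest = rest[k + 1:]
--
--     found = any(l.strip().startswith("<<<<<<<") for l in lines)
--     return "".join(out), found
-- ===== Notes on version B (the rewrite author's own statement) =====
-- stated objective: alternative
-- what changed: A walks one global index through the line list with hand-maintained inner skip-loops and a mutable conflict flag; B repeatedly searches for the next conflict block with a find helper, copies the clean prefix slice over unchanged, cuts the block out by slicing, and computes the conflict flag independently with any().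
import Mathlib
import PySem

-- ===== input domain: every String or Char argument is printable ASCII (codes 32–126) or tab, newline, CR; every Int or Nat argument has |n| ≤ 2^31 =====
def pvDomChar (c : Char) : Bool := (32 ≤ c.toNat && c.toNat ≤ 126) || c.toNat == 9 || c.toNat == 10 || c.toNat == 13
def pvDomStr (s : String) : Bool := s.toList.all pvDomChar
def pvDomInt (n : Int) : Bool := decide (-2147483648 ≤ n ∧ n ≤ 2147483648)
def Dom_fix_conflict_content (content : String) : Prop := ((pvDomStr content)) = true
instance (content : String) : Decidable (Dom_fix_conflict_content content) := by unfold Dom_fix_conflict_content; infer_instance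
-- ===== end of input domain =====

-- B rewrites A's manual index-walking loop as a slice-and-search scan (find next block,
-- copy the clean prefix, cut the block out) with the conflict flag computed separately; objective: alternative.

-- ===== SHARED HELPERS (transliterations of expressions both Pythons evaluate verbatim) =====

-- marker strings
def pvHeadTok : List Char := "<<<<<<< HEAD".toList
def pvStartTok : List Char := "<<<<<<<".toList
def pvSepTok : List Char := "=======".toList
def pvEndTok : List Char := ">>>>>>>".toList
def pvPragmaTok : List Char := "pragma: allowlist secret".toList

-- line.strip().startswith(marker)
def pvIsMarker (m : List Char) (line : List Char) : Bool :=
  PySem.Chars.startswith (PySem.Chars.strip line) m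

-- the pragma / longer-line selection chain (identical in A and B)
def pvChoose (head their : List Char) : List Char :=
  if PySem.Chars.isIn pvPragmaTok head then head
  else if PySem.Chars.isIn pvPragmaTok their then their
  else if their.length < head.length then head else their

-- content.splitlines(keepends=True): hand port, exact on Dom_fix_conflict_content
-- (its characters admit only "\n", "\r", "\r\n" as line breaks, Python's rule for those)
def pvSplitKeep (acc : List Char) : List Char → List (List Char)
  | [] => if acc.isEmpty then [] else [acc.reverse]
  | '\r' :: '\n' :: rest => (acc.reverse ++ ['\r', '\n']) :: pvSplitKeep [] rest
  | '\r' :: rest => (acc.reverse ++ ['\r']) :: pvSplitKeep [] rest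
  | '\n' :: rest => (acc.reverse ++ ['\n']) :: pvSplitKeep [] rest
  | c :: rest => pvSplitKeep (c :: acc) rest

-- ===== PORT A =====

-- A's inner "while i < len(lines) and not lines[i].strip().startswith(marker): i += 1"
def pvSkipTo (p : List Char → Bool) (lines : List (List Char)) (i : Nat) : Nat :=
  if h : i < lines.length then
    if p lines[i] then i else pvSkipTo p lines (i + 1)
  else i
termination_by lines.length - i

-- needed by pvLoopA's termination
theorem le_pvSkipTo (p : List Char → Bool) (lines : List (List Char)) (i : Nat) :
    i ≤ pvSkipTo p lines i := by
  unfold pvSkipTo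
  split
  · split
    · exact le_refl i
    · exact le_trans (Nat.le_succ i) (le_pvSkipTo p lines (i + 1))
  · exact le_refl i
termination_by lines.length - i

-- A's outer while-loop; `none` is exactly where the Python raises IndexError
def pvLoopA (lines : List (List Char)) (i : Nat) (res : List (List Char)) (found : Bool) :
    Option (List (List Char) × Bool) :=
  if h : i < lines.length then
    let line := lines[i]
    if pvIsMarker pvStartTok line then
      match lines[i + 1]? with
      | none => none                           -- head_line = lines[i]  → IndexError
      | some head =>
        let j := pvSkipTo (pvIsMarker pvSepTok) lines (i + 1)
        match lines[j + 1]? with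
        | none => none                         -- their_line = lines[i] → IndexError
        | some their =>
          let k := pvSkipTo (pvIsMarker pvEndTok) lines (j + 1)
          pvLoopA lines (k + 1) (res ++ [pvChoose head their]) true
    else
      pvLoopA lines (i + 1) (res ++ [line]) found
  else some (res, found)
termination_by lines.length + 1 - i
decreasing_by
  · have h1 := le_pvSkipTo (pvIsMarker pvSepTok) lines (i + 1)
    have h2 := le_pvSkipTo (pvIsMarker pvEndTok) lines
      (pvSkipTo (pvIsMarker pvSepTok) lines (i + 1) + 1)
    omega
  · omega

def fix_conflict_content (content : String) : String × Bool :=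
  if PySem.Chars.isIn pvHeadTok content.toList = false then (content, false)
  else
    match pvLoopA (pvSplitKeep [] content.toList) 0 [] false with
    | some (res, found) => (String.ofList (PySem.Chars.join [] res), found)
    | none => ("", false)   -- Python raises IndexError here; excluded by Pre_

-- ===== PORT B =====

-- Source B's _find(lines, marker, start): first index ≥ start whose line is a marker line
def pvFindFrom (m : List Char) (lines : List (List Char)) (start : Nat) : Option Nat :=
  (List.findIdx? (pvIsMarker m) (lines.drop start)).map (· + start)

-- needed by the terminations below
theorem findIdx?_lt_length {α : Type} (p : α → Bool) (l : List α) (n : Nat)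
    (h : List.findIdx? p l = some n) : n < l.length := by
  induction l generalizing n with
  | nil => simp [List.findIdx?_nil] at h
  | cons a l ih =>
    rw [List.findIdx?_cons] at h
    by_cases hp : p a
    · simp [hp] at h
      simp only [List.length_cons]
      omega
    · simp [hp] at h
      obtain ⟨m, hm, rfl⟩ := h
      have := ih m hm
      simp only [List.length_cons]
      omega

theorem pvFindFrom_lt (m : List Char) (lines : List (List Char)) (start j : Nat)
    (h : pvFindFrom m lines start = some j) : j < lines.length := by
  unfold pvFindFrom at h
  obtain ⟨j', hj', rfl⟩ := Option.map_eq_some_iff.mp h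
  have := findIdx?_lt_length _ _ _ hj'
  simp [List.length_drop] at this
  omega

-- Source B's while-loop: out accumulates the fixed lines, rest is the unprocessed tail;
-- `none` is exactly where Source B raises IndexError
def pvResolveGo (out : List (List Char)) (rest : List (List Char)) :
    Option (List (List Char)) :=
  match hs : pvFindFrom pvStartTok rest 0 with
  | none => some (out ++ rest)
  | some s =>
    match rest[s + 1]? with
    | none => none
    | some head =>
      match pvFindFrom pvSepTok rest (s + 1) with
      | none => none
      | some j =>
        match rest[j + 1]? with
        | none => none
        | some their =>
          let k := (pvFindFrom pvEndTok rest (j + 1)).getD rest.length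
          pvResolveGo (out ++ rest.take s ++ [pvChoose head their]) (rest.drop (k + 1))
termination_by rest.length
decreasing_by
  have := pvFindFrom_lt pvStartTok rest 0 s hs
  simp [List.length_drop]
  omega

def fix_conflict_content_alt (content : String) : String × Bool :=
  if PySem.Chars.isIn pvHeadTok content.toList = false then (content, false)
  else
    let lines := pvSplitKeep [] content.toList
    match pvResolveGo [] lines with
    | some fixed =>
      (String.ofList (PySem.Chars.join [] fixed), lines.any (pvIsMarker pvStartTok))
    | none => ("", false)

-- ===== PRECONDITION & SPEC =====

-- well-formed conflict markers: every "<<<<<<<" start line is followed by a "======="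
-- line that has at least one line after it (scanning block after block)
def pvWF (lines : List (List Char)) : Bool :=
  match hs : pvFindFrom pvStartTok lines 0 with
  | none => true
  | some s =>
    match pvFindFrom pvSepTok lines (s + 1) with
    | none => false
    | some j =>
      if j + 1 < lines.length then
        pvWF (lines.drop ((pvFindFrom pvEndTok lines (j + 1)).getD lines.length + 1))
      else false
termination_by lines.length
decreasing_by
  have := pvFindFrom_lt pvStartTok lines 0 s hs
  simp [List.length_drop]
  omega

-- Pre_ excludes exactly the inputs where A raises IndexError: content that announces a
-- conflict ("<<<<<<< HEAD" present) but whose marker lines are malformed/unterminated.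
-- (Splitting content into its lines here only states the input's line shape — the
-- conflict-marker structure pvWF checks is about the lines themselves, not about what
-- either program computes from them.)
def Pre_fix_conflict_content (content : String) : Prop :=
  PySem.Chars.isIn pvHeadTok content.toList = false ∨
    pvWF (pvSplitKeep [] content.toList) = true
instance (content : String) : Decidable (Pre_fix_conflict_content content) := by
  unfold Pre_fix_conflict_content; infer_instance

-- no "<<<<<<< HEAD" in it, so the first disjunct of Pre_ holds (kernel-reducible)
def pvWitness_fix_conflict_content : String :=
  "x = 1\ny = 2\n"

def Spec_fix_conflict_content (content : String) (out : String × Bool) : Prop := out = fix_conflict_content_alt content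
instance (content : String) (out : String × Bool) : Decidable (Spec_fix_conflict_content content out) := by unfold Spec_fix_conflict_content; infer_instance

-- ===== CLAIM (what is proved, stated in full; the proofs are below) =====
def Claim_equal_fix_conflict_content : Prop := ∀ (content : String), Dom_fix_conflict_content content → Pre_fix_conflict_content content → Spec_fix_conflict_content content (fix_conflict_content content)

-- ===== LEMMAS AND PROOFS =====

-- relative-to-absolute conversions for Source B's find on a dropped suffix
theorem pvFindFrom_drop (m : List Char) (L : List (List Char)) (i j : Nat) :
    pvFindFrom m (L.drop i) j = ((L.drop (i + j)).findIdx? (pvIsMarker m)).map (· + j) := by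
  unfold pvFindFrom
  rw [List.drop_drop]

theorem pvFindFrom_cons_succ (m x : List Char) (l : List (List Char)) (n : Nat) :
    pvFindFrom m (x :: l) (n + 1) = (pvFindFrom m l n).map (· + 1) := by
  unfold pvFindFrom
  rw [List.drop_succ_cons]
  cases (l.drop n).findIdx? (pvIsMarker m) with
  | none => simp
  | some t => simp; omega

theorem pvFindFrom_cons_zero (m x : List Char) (l : List (List Char)) :
    pvFindFrom m (x :: l) 0 =
      if pvIsMarker m x then some 0 else (pvFindFrom m l 0).map (· + 1) := by
  unfold pvFindFrom
  rw [List.drop_zero, List.drop_zero, List.findIdx?_cons]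
  by_cases hx : pvIsMarker m x
  · simp [hx]
  · cases l.findIdx? (pvIsMarker m) with
    | none => simp [hx]
    | some t => simp [hx]

-- A's skip loop computes "first marker index from n, else len"
theorem pvSkipTo_eq (p : List Char → Bool) (lines : List (List Char)) (n : Nat)
    (hn : n ≤ lines.length) :
    pvSkipTo p lines n =
      (((lines.drop n).findIdx? p).map (· + n)).getD lines.length := by
  unfold pvSkipTo
  split
  · rename_i h
    rw [List.drop_eq_getElem_cons h, List.findIdx?_cons]
    by_cases hp : p lines[n]
    · simp [hp]
    · simp only [hp, Bool.false_eq_true, if_false]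
      rw [pvSkipTo_eq p lines (n + 1) (by omega)]
      cases ho : (lines.drop (n + 1)).findIdx? p with
      | none => simp
      | some m => simp; omega
  · rename_i h
    have : n = lines.length := by omega
    subst this
    simp
termination_by lines.length - n

theorem pvResolveGo_nil (out : List (List Char)) : pvResolveGo out [] = some out := by
  rw [pvResolveGo.eq_def]
  simp [pvFindFrom]

-- one step of Source B's loop past a non-marker line just moves it into out
theorem pvResolveGo_cons_not_start (out : List (List Char)) (x : List Char)
    (l : List (List Char)) (hx : pvIsMarker pvStartTok x = false) :
    pvResolveGo out (x :: l) = pvResolveGo (out ++ [x]) l := by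
  rw [pvResolveGo.eq_def, pvResolveGo.eq_def]
  rw [pvFindFrom_cons_zero, if_neg (by simp [hx])]
  cases hf : pvFindFrom pvStartTok l 0 with
  | none => simp
  | some s =>
    simp only [Option.map_some]
    rw [List.getElem?_cons_succ, pvFindFrom_cons_succ]
    cases h1 : l[s + 1]? with
    | none => simp
    | some head =>
      simp only []
      cases h2 : pvFindFrom pvSepTok l (s + 1) with
      | none => simp
      | some j =>
        simp only [Option.map_some]
        rw [List.getElem?_cons_succ]
        cases h3 : l[j + 1]? with
        | none => simp
        | some their =>
          simp only []
          rw [pvFindFrom_cons_succ]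
          have hk : ((pvFindFrom pvEndTok l (j + 1)).map (· + 1)).getD (x :: l).length
              = (pvFindFrom pvEndTok l (j + 1)).getD l.length + 1 := by
            cases pvFindFrom pvEndTok l (j + 1) with
            | none => simp
            | some t => simp
          rw [hk]
          rw [List.drop_succ_cons, List.take_succ_cons]
          congr 1
          simp

-- absolute-index one-step unfolding of Source B's loop on a suffix headed by a start marker
theorem pvResolveGo_start (res : List (List Char)) (L : List (List Char)) (i : Nat)
    (hi : i < L.length) (hst : pvIsMarker pvStartTok L[i] = true) :
    pvResolveGo res (L.drop i) =
      match L[i + 1]? with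
      | none => none
      | some head =>
        match (L.drop (i + 1)).findIdx? (pvIsMarker pvSepTok) with
        | none => none
        | some m =>
          match L[i + m + 2]? with
          | none => none
          | some their =>
            pvResolveGo (res ++ [pvChoose head their])
              (L.drop ((((L.drop (i + m + 2)).findIdx? (pvIsMarker pvEndTok)).map
                  (· + (i + m + 2))).getD L.length + 1)) := by
  have hcons := List.drop_eq_getElem_cons hi
  have hfs : pvFindFrom pvStartTok (L.drop i) 0 = some 0 := by
    rw [hcons, pvFindFrom_cons_zero, if_pos hst]
  rw [pvResolveGo.eq_def]
  rw [hfs]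
  simp only []
  have h1 : (L.drop i)[0 + 1]? = L[i + 1]? := by
    rw [List.getElem?_drop]
  rw [h1]
  cases e1 : L[i + 1]? with
  | none => simp
  | some head =>
    simp only []
    have h2 : pvFindFrom pvSepTok (L.drop i) (0 + 1) =
        ((L.drop (i + 1)).findIdx? (pvIsMarker pvSepTok)).map (· + 1) := by
      rw [pvFindFrom_drop]
    rw [h2]
    cases e2 : (L.drop (i + 1)).findIdx? (pvIsMarker pvSepTok) with
    | none => simp
    | some m =>
      simp only [Option.map_some]
      have h3 : (L.drop i)[m + 1 + 1]? = L[i + m + 2]? := by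
        rw [List.getElem?_drop]
        congr 1
      rw [h3]
      cases e3 : L[i + m + 2]? with
      | none => simp
      | some their =>
        simp only []
        have h4 : pvFindFrom pvEndTok (L.drop i) (m + 1 + 1) =
            ((L.drop (i + m + 2)).findIdx? (pvIsMarker pvEndTok)).map (· + (m + 2)) := by
          rw [pvFindFrom_drop]
          congr 2
        rw [h4]
        have h5 : (L.drop i).take 0 = [] := by simp
        rw [h5]
        have h6 :
            (L.drop i).drop
                ((((L.drop (i + m + 2)).findIdx? (pvIsMarker pvEndTok)).map
                    (· + (m + 2))).getD (L.drop i).length + 1) =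
              L.drop ((((L.drop (i + m + 2)).findIdx? (pvIsMarker pvEndTok)).map
                  (· + (i + m + 2))).getD L.length + 1) := by
          cases e4 : (L.drop (i + m + 2)).findIdx? (pvIsMarker pvEndTok) with
          | none =>
            simp only [Option.map_none, Option.getD_none, List.length_drop]
            rw [List.drop_drop]
            congr 1
            omega
          | some t =>
            simp only [Option.map_some, Option.getD_some]
            rw [List.drop_drop]
            congr 1
            omega
        rw [h6]
        congr 1
        simp

-- main loop correspondence: A's indexed loop equals Source B's slice scan on the suffix
theorem pvLoopA_eq (lines : List (List Char)) (i : Nat) (res : List (List Char))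
    (found : Bool) :
    pvLoopA lines i res found =
      (pvResolveGo res (lines.drop i)).map
        (fun ls => (ls, found || (lines.drop i).any (pvIsMarker pvStartTok))) := by
  rw [pvLoopA.eq_def]
  split
  · rename_i hi
    simp only []
    by_cases hst : pvIsMarker pvStartTok lines[i]
    · simp only [hst, if_true]
      rw [pvResolveGo_start res lines i hi hst]
      have hany : (lines.drop i).any (pvIsMarker pvStartTok) = true := by
        rw [List.drop_eq_getElem_cons hi, List.any_cons, hst]
        simp
      cases e1 : lines[i + 1]? with
      | none => simp
      | some head =>
        simp only []
        rw [pvSkipTo_eq (pvIsMarker pvSepTok) lines (i + 1) (by omega)]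
        cases e2 : (lines.drop (i + 1)).findIdx? (pvIsMarker pvSepTok) with
        | none =>
          simp only [Option.map_none, Option.getD_none]
          rw [List.getElem?_eq_none (by omega)]
        | some m =>
          simp only [Option.map_some, Option.getD_some]
          have hidx : m + (i + 1) + 1 = i + m + 2 := by omega
          rw [hidx]
          cases e3 : lines[i + m + 2]? with
          | none => simp
          | some their =>
            simp only []
            have hlt : i + m + 2 < lines.length := by
              obtain ⟨h, -⟩ := List.getElem?_eq_some_iff.mp e3
              exact h
            rw [pvSkipTo_eq (pvIsMarker pvEndTok) lines (i + m + 2) (by omega)]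
            rw [pvLoopA_eq lines
              ((((lines.drop (i + m + 2)).findIdx? (pvIsMarker pvEndTok)).map
                  (· + (i + m + 2))).getD lines.length + 1)
              (res ++ [pvChoose head their]) true]
            rw [hany]
            cases pvResolveGo (res ++ [pvChoose head their])
                (lines.drop
                  ((((lines.drop (i + m + 2)).findIdx? (pvIsMarker pvEndTok)).map
                      (· + (i + m + 2))).getD lines.length + 1)) with
            | none => simp
            | some ls => simp
    · simp only [hst, Bool.false_eq_true, if_false]
      rw [pvLoopA_eq lines (i + 1) (res ++ [lines[i]]) found]
      rw [List.drop_eq_getElem_cons hi,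
        pvResolveGo_cons_not_start res lines[i] (lines.drop (i + 1)) (by simpa using hst)]
      rw [List.any_cons]
      simp only [hst]
      rfl
  · rename_i hi
    rw [List.drop_eq_nil_of_le (by omega), pvResolveGo_nil]
    simp
termination_by lines.length + 1 - i
decreasing_by
  · have h2 := findIdx?_lt_length (pvIsMarker pvSepTok) (lines.drop (i + 1)) m e2
    simp [List.length_drop] at h2
    cases e4 : (lines.drop (i + m + 2)).findIdx? (pvIsMarker pvEndTok) with
    | none => simp; omega
    | some t => simp; omega
  · omega

-- ===== VERDICT (by name: the statement is the Claim_ definition above) =====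
theorem fix_conflict_content_spec : Claim_equal_fix_conflict_content := by
  intro content _ _
  unfold Spec_fix_conflict_content fix_conflict_content fix_conflict_content_alt
  by_cases hin : PySem.Chars.isIn pvHeadTok content.toList = false
  · simp [hin]
  · simp only [hin]
    have h := pvLoopA_eq (pvSplitKeep [] content.toList) 0 [] false
    simp only [List.drop_zero] at h
    rw [h]
    cases hr : pvResolveGo [] (pvSplitKeep [] content.toList) with
    | none => simp
    | some fixed => simp
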